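-- pv_equiv track=rewrite | github.com/mfouda/BIOINF588 | p_loop/project.py | hasPloop
-- ===== SOURCE A (Python) =====
-- def hasPloop(seq):
--     for i in range (0, len(seq)):
--         if ((len(seq)>i+7)
--         and (seq[i+5]=="G")
--         and (seq[i+6]=="K")
--         and (seq[i]=="A" or seq[i]=="G")
--         and (seq[i+7]=="S" or seq[i+7]=="T")):
--             return(True)
--     return(False)
-- ===== SOURCE B (Python) =====
-- def hasPloop(seq):
--     # Jump between candidate 'GK' sites instead of testing every index.
--     pos = seq.find("GK", 5)
--     while pos != -1:
--         if pos + 2 < len(seq) and seq[pos - 5] in "AG" and seq[pos + 2] in "ST":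
--             return True
--         pos = seq.find("GK", pos + 1)
--     return False
-- ===== Notes on version B (the rewrite author's own statement) =====
-- stated objective: faster
-- what changed: Instead of testing the motif window at every index, B jumps between candidate motif-core occurrences with str.find(start) and only checks the flanking characters there, so the scan runs inside the C substring search.
import Mathlib
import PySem

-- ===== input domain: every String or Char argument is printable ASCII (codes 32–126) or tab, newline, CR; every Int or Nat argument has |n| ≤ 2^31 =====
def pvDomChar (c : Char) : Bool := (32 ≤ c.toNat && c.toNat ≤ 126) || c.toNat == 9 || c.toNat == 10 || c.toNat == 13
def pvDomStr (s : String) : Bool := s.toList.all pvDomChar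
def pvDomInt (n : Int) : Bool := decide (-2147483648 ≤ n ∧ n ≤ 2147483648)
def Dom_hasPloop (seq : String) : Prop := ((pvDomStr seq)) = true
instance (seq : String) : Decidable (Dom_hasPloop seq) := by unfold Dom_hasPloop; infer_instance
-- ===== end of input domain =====

-- B jumps between candidate motif-core occurrences via str.find(start) instead of testing the window at every index; measurably faster (the scan runs inside the C substring search); proved equal on all inputs.


-- ===== PORT A =====
-- A: for i in range(0, len(seq)): test the 8-char window at i; the early 'return True' is List.any.
def condA (l : List Char) (i : Int) : Bool :=
  decide ((l.length : Int) > i + 7) &&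
  (PySem.List.pyGet? l (i + 5) == some 'G') &&
  (PySem.List.pyGet? l (i + 6) == some 'K') &&
  ((PySem.List.pyGet? l i == some 'A') || (PySem.List.pyGet? l i == some 'G')) &&
  ((PySem.List.pyGet? l (i + 7) == some 'S') || (PySem.List.pyGet? l (i + 7) == some 'T'))

def hasPloop (seq : String) : Bool :=
  let l := seq.toList
  (PySem.List.pyRange 0 (l.length : Int) 1).any (fun i => condA l i)

-- ===== PORT B =====
-- B: the test inside the while loop (pos+2 in range, seq[pos-5] in "AG", seq[pos+2] in "ST").
def condB (l : List Char) (pos : Int) : Bool :=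
  decide (pos + 2 < (l.length : Int)) &&
  ((PySem.List.pyGet? l (pos - 5) == some 'A') || (PySem.List.pyGet? l (pos - 5) == some 'G')) &&
  ((PySem.List.pyGet? l (pos + 2) == some 'S') || (PySem.List.pyGet? l (pos + 2) == some 'T'))

-- B's while loop: pos = seq.find("GK", start); the 'start ≤ length' guard only makes the
-- recursion total (find past the end returns -1 and the loop ends either way).
def goB (l : List Char) (start : Nat) : Bool :=
  if hs : start ≤ l.length then
    if hp : PySem.Chars.findFrom l ['G', 'K'] (start : Int) none = -1 then false
    else if condB l (PySem.Chars.findFrom l ['G', 'K'] (start : Int) none) then true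
    else goB l ((PySem.Chars.findFrom l ['G', 'K'] (start : Int) none).toNat + 1)
  else false
termination_by l.length + 1 - start
decreasing_by
  have hspec := PySem.Chars.findFrom_natCast_spec l ['G', 'K'] start hs hp
  have h2 := hspec.2.1.length_le
  simp [List.length_drop] at h2
  omega

def hasPloop_alt (seq : String) : Bool := goB seq.toList 5

-- ===== PRECONDITION & SPEC =====
def Spec_hasPloop (seq : String) (out : Bool) : Prop := out = hasPloop_alt seq
instance (seq : String) (out : Bool) : Decidable (Spec_hasPloop seq out) := by unfold Spec_hasPloop; infer_instance

-- ===== CLAIM (what is proved, stated in full; the proofs are below) =====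
def Claim_equal_hasPloop : Prop := ∀ (seq : String), Dom_hasPloop seq → Spec_hasPloop seq (hasPloop seq)

-- ===== LEMMAS AND PROOFS =====

-- a two-character prefix, characterised by lookups
lemma prefix_GK_iff (t : List Char) :
    ['G', 'K'] <+: t ↔ t[0]? = some 'G' ∧ t[1]? = some 'K' := by
  match t with
  | [] => simp
  | [a] => simp [List.prefix_iff_eq_take]
  | a :: b :: rest =>
    constructor
    · rintro ⟨s, hs⟩
      simp at hs
      simp [hs.1.symm, hs.2.1.symm]
    · rintro ⟨h1, h2⟩
      simp at h1 h2
      exact ⟨rest, by simp [h1, h2]⟩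

lemma prefix_GK_drop_iff (l : List Char) (p : Nat) :
    ['G', 'K'] <+: l.drop p ↔ l[p]? = some 'G' ∧ l[p + 1]? = some 'K' := by
  rw [prefix_GK_iff, List.getElem?_drop, List.getElem?_drop]
  norm_num

-- what B's loop computes: 'some acceptable GK site at or after start'
lemma goB_iff (l : List Char) (start : Nat) :
    goB l start = true ↔
      ∃ p : Nat, start ≤ p ∧ ['G', 'K'] <+: l.drop p ∧ condB l (p : Int) = true := by
  induction start using goB.induct (l := l) with
  | case1 x hx hp =>
    rw [goB, dif_pos hx, dif_pos hp]
    refine iff_of_false (by simp) ?_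
    rintro ⟨p, hp1, hp2, -⟩
    rw [PySem.Chars.findFrom_natCast_eq_neg_one_iff l ['G', 'K'] x hx] at hp
    apply hp
    have hdd : (l.drop x).drop (p - x) = l.drop p := by
      rw [List.drop_drop]; congr 1; omega
    exact hdd ▸ hp2 |>.isInfix.trans (List.drop_suffix _ _).isInfix
  | case2 x hx hp hc =>
    rw [goB, dif_pos hx, dif_neg hp, if_pos hc]
    have hspec := PySem.Chars.findFrom_natCast_spec l ['G', 'K'] x hx hp
    have h0 : (0:Int) ≤ PySem.Chars.findFrom l ['G', 'K'] (x : Int) none :=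
      le_trans (by positivity) hspec.1
    refine iff_of_true rfl
      ⟨(PySem.Chars.findFrom l ['G', 'K'] (x : Int) none).toNat, by omega, hspec.2.1, ?_⟩
    rwa [Int.toNat_of_nonneg h0]
  | case3 x hx hp hc ih =>
    rw [goB, dif_pos hx, dif_neg hp, if_neg hc, ih]
    have hspec := PySem.Chars.findFrom_natCast_spec l ['G', 'K'] x hx hp
    have h0 : (0:Int) ≤ PySem.Chars.findFrom l ['G', 'K'] (x : Int) none :=
      le_trans (by positivity) hspec.1
    constructor
    · rintro ⟨p, hp1, hp2, hp3⟩
      exact ⟨p, by omega, hp2, hp3⟩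
    · rintro ⟨p, hp1, hp2, hp3⟩
      refine ⟨p, ?_, hp2, hp3⟩
      by_contra hlt
      rcases Nat.lt_or_ge p (PySem.Chars.findFrom l ['G', 'K'] (x : Int) none).toNat with h | h
      · exact hspec.2.2 p hp1 h hp2
      · have hpe : p = (PySem.Chars.findFrom l ['G', 'K'] (x : Int) none).toNat := by omega
        subst hpe
        rw [Int.toNat_of_nonneg h0] at hp3
        exact hc hp3
  | case4 x hx =>
    rw [goB, dif_neg hx]
    refine iff_of_false (by simp) ?_
    rintro ⟨p, hp1, hp2, -⟩
    have h := hp2.length_le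
    simp [List.length_drop] at h
    omega

-- A's window test at a natural index, spelled out
lemma condA_nat (l : List Char) (j : Nat) :
    condA l (j : Int) = true ↔
      (j + 7 < l.length ∧ l[j + 5]? = some 'G' ∧ l[j + 6]? = some 'K' ∧
       (l[j]? = some 'A' ∨ l[j]? = some 'G') ∧ (l[j + 7]? = some 'S' ∨ l[j + 7]? = some 'T')) := by
  have h5 : (j : Int) + 5 = ((j + 5 : Nat) : Int) := by push_cast; ring
  have h6 : (j : Int) + 6 = ((j + 6 : Nat) : Int) := by push_cast; ring
  have h7 : (j : Int) + 7 = ((j + 7 : Nat) : Int) := by push_cast; ring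
  unfold condA
  rw [h5, h6, h7]
  simp only [PySem.List.pyGet?_natCast, Bool.and_eq_true, Bool.or_eq_true, beq_iff_eq,
    decide_eq_true_eq]
  rw [show ((l.length : Int) > ((j + 7 : Nat) : Int)) ↔ j + 7 < l.length by omega]
  tauto

-- B's flank test at a natural index ≥ 5, spelled out
lemma condB_nat (l : List Char) (p : Nat) (hp : 5 ≤ p) :
    condB l (p : Int) = true ↔
      (p + 2 < l.length ∧ (l[p - 5]? = some 'A' ∨ l[p - 5]? = some 'G') ∧
       (l[p + 2]? = some 'S' ∨ l[p + 2]? = some 'T')) := by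
  have h5 : (p : Int) - 5 = ((p - 5 : Nat) : Int) := by omega
  have h2 : (p : Int) + 2 = ((p + 2 : Nat) : Int) := by push_cast; ring
  unfold condB
  rw [h5, h2]
  simp only [PySem.List.pyGet?_natCast, Bool.and_eq_true, Bool.or_eq_true, beq_iff_eq,
    decide_eq_true_eq]
  rw [show (((p + 2 : Nat) : Int) < (l.length : Int)) ↔ p + 2 < l.length by omega]
  tauto

-- what A's loop computes, in the same terms as goB_iff (the GK site is window start + 5)
lemma hasPloop_iff (seq : String) :
    hasPloop seq = true ↔
      ∃ p : Nat, 5 ≤ p ∧ ['G', 'K'] <+: seq.toList.drop p ∧ condB seq.toList (p : Int) = true := by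
  unfold hasPloop
  rw [List.any_eq_true]
  constructor
  · rintro ⟨i, hmem, hca⟩
    rw [PySem.List.mem_pyRange_one] at hmem
    obtain ⟨h0, -⟩ := hmem
    obtain ⟨j, rfl⟩ : ∃ j : Nat, (j : Int) = i := ⟨i.toNat, by omega⟩
    rw [condA_nat] at hca
    obtain ⟨hlen, hG, hK, hAG, hST⟩ := hca
    refine ⟨j + 5, by omega, ?_, ?_⟩
    · rw [prefix_GK_drop_iff]
      exact ⟨hG, by simpa using hK⟩
    · rw [condB_nat _ _ (by omega)]
      refine ⟨by omega, ?_, ?_⟩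
      · simpa using hAG
      · have : j + 5 + 2 = j + 7 := by omega
        rw [this]; exact hST
  · rintro ⟨p, hp5, hpre, hcb⟩
    rw [prefix_GK_drop_iff] at hpre
    rw [condB_nat _ _ hp5] at hcb
    obtain ⟨hlen, hAG, hST⟩ := hcb
    refine ⟨((p - 5 : Nat) : Int), ?_, ?_⟩
    · rw [PySem.List.mem_pyRange_one]
      constructor
      · positivity
      · omega
    · rw [condA_nat]
      refine ⟨by omega, ?_, ?_, hAG, ?_⟩
      · have : p - 5 + 5 = p := by omega
        rw [this]; exact hpre.1
      · have : p - 5 + 6 = p + 1 := by omega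
        rw [this]; exact hpre.2
      · have : p - 5 + 7 = p + 2 := by omega
        rw [this]; exact hST

-- ===== VERDICT (by name: the statement is the Claim_ definition above) =====
theorem hasPloop_spec : Claim_equal_hasPloop := by
  intro seq _
  unfold Spec_hasPloop hasPloop_alt
  have h := (hasPloop_iff seq).trans (goB_iff seq.toList 5).symm
  cases hA : hasPloop seq <;> cases hB : goB seq.toList 5 <;> simp_all
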